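-- pv_equiv track=rewrite | github.com/myxyy/RecursiveCompressorHF | dataset.py | _pack_chunks
-- ===== SOURCE A (Python) =====
-- def _pack_chunks(chunks, context_length, pad_token_id):
--     """チャンクをcontext_length長のサンプルに詰め込む。
--     各チャンクはそのまま連結（末尾BOSは追加しない；次チャンクの先頭BOSが区切り役）。
--     不足分はPADで埋める。返すリストの全要素は必ずcontext_length長。"""
--     packed = []
--     current = []
--
--     def _flush():
--         seq = (current + [pad_token_id] * context_length)[:context_length]
--         packed.append(seq)
--
--     for chunk in chunks:
--         assert len(chunk) <= context_length, \
--             f"Chunk exceeds context_length: {len(chunk)} > {context_length}"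
--         if len(current) + len(chunk) > context_length:
--             _flush()
--             current = list(chunk)
--         else:
--             current.extend(chunk)
--
--     if current:
--         _flush()
--
--     assert all(len(s) == context_length for s in packed), \
--         f"Pack length mismatch: {set(len(s) for s in packed)}, expected {context_length}"
--     return packed
-- ===== SOURCE B (Python) =====
-- def _pack_chunks(chunks, context_length, pad_token_id):
--     """Two-phase packing: first compute group boundaries as (start, end) index
--     ranges over the chunk list, then render each range by flattening and padding."""
--     # Phase 1: greedy boundary computation over chunk indices (token counts only).
--     groups = []
--     start = 0
--     count = 0
--     for i, chunk in enumerate(chunks):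
--         assert len(chunk) <= context_length, \
--             f"Chunk exceeds context_length: {len(chunk)} > {context_length}"
--         if count + len(chunk) > context_length:
--             groups.append((start, i))
--             start = i
--             count = len(chunk)
--         else:
--             count += len(chunk)
--     if count:
--         groups.append((start, len(chunks)))
--     # Phase 2: render each index range.
--     packed = []
--     for s, e in groups:
--         seq = [t for c in chunks[s:e] for t in c]
--         packed.append(seq + [pad_token_id] * (context_length - len(seq)))
--     assert all(len(s) == context_length for s in packed), \
--         f"Pack length mismatch: {set(len(s) for s in packed)}, expected {context_length}"
--     return packed
-- ===== Notes on version B (the rewrite author's own statement) =====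
-- stated objective: alternative
-- what changed: B splits A's single streaming loop (which accumulates token lists and emits padded sequences on the fly) into two phases: a greedy pass that only tracks token counts and records group boundaries as (start, end) chunk-index ranges, then a rendering pass that flattens each range and pads it.
import Mathlib
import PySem

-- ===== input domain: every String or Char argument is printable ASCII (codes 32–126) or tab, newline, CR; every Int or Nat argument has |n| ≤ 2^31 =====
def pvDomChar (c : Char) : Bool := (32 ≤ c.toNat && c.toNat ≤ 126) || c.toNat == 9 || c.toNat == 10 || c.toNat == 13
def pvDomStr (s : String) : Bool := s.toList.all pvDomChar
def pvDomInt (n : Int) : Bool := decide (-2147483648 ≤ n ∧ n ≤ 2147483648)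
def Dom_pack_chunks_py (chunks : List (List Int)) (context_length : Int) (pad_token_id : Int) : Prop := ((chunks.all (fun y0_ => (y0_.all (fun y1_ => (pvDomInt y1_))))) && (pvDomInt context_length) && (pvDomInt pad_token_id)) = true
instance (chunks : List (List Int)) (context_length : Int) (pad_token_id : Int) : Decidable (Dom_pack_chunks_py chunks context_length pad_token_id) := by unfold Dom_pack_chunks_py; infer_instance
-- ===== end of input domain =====

-- B replaces A's streaming token-list accumulator by a two-phase decomposition
-- (greedy boundary computation over index ranges, then rendering); objective: alternative, same cost.

-- ===== PORT A =====
-- _flush: (current + [pad]*context_length)[:context_length]; inside Pre_ the flush is only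
-- reached with context_length ≥ 0, where .toNat is exact for the Python slice/replication.
def pyFlushA (current : List Int) (context_length pad_token_id : Int) : List Int :=
  (current ++ List.replicate context_length.toNat pad_token_id).take context_length.toNat

-- the `for chunk in chunks` loop with state (packed, current), then the trailing `if current:` flush
def packALoop (rest : List (List Int)) (packed : List (List Int)) (current : List Int)
    (context_length pad_token_id : Int) : List (List Int) :=
  match rest with
  | [] => if current ≠ [] then packed ++ [pyFlushA current context_length pad_token_id] else packed
  | chunk :: rs =>
      if ((current.length : Int) + chunk.length > context_length) then
        packALoop rs (packed ++ [pyFlushA current context_length pad_token_id]) chunk context_length pad_token_id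
      else
        packALoop rs packed (current ++ chunk) context_length pad_token_id

def pack_chunks_py (chunks : List (List Int)) (context_length : Int) (pad_token_id : Int) : List (List Int) :=
  packALoop chunks [] [] context_length pad_token_id

-- ===== PORT B =====
-- Phase 2 body: seq = flatten of chunks[s:e]; seq + [pad]*(context_length - len(seq))
-- ([pad]*m is empty for m < 0, which .toNat of the Int difference reproduces exactly).
def renderGroup (chunks : List (List Int)) (context_length pad_token_id : Int) (se : Nat × Nat) : List Int :=
  let seq := ((chunks.drop se.1).take (se.2 - se.1)).flatMap id
  seq ++ List.replicate ((context_length - seq.length : Int)).toNat pad_token_id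

-- Phase 1: the `for i, chunk in enumerate(chunks)` loop with state (groups, start, count),
-- then the trailing `if count:` append of (start, len(chunks)) (i = len(chunks) at the end).
def packBLoop (rest : List (List Int)) (i : Nat) (groups : List (Nat × Nat)) (start : Nat)
    (count : Int) (context_length : Int) : List (Nat × Nat) :=
  match rest with
  | [] => if count ≠ 0 then groups ++ [(start, i)] else groups
  | chunk :: rs =>
      if count + (chunk.length : Int) > context_length then
        packBLoop rs (i + 1) (groups ++ [(start, i)]) i (chunk.length : Int) context_length
      else
        packBLoop rs (i + 1) groups start (count + chunk.length) context_length

def pack_chunks_py_alt (chunks : List (List Int)) (context_length : Int) (pad_token_id : Int) : List (List Int) :=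
  (packBLoop chunks 0 [] 0 0 context_length).map (renderGroup chunks context_length pad_token_id)

-- ===== PRECONDITION & SPEC =====
-- Pre_ excludes exactly the inputs on which A's per-chunk assert raises (a chunk longer than
-- context_length); A returns on every input satisfying Pre_.
def Pre_pack_chunks_py (chunks : List (List Int)) (context_length : Int) (pad_token_id : Int) : Prop :=
  ∀ c ∈ chunks, (c.length : Int) ≤ context_length
instance (chunks : List (List Int)) (context_length : Int) (pad_token_id : Int) : Decidable (Pre_pack_chunks_py chunks context_length pad_token_id) := by unfold Pre_pack_chunks_py; infer_instance

def pvWitness_pack_chunks_py : List (List Int) × Int × Int := ([[1, 2], [3]], 2, 0)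

def Spec_pack_chunks_py (chunks : List (List Int)) (context_length : Int) (pad_token_id : Int) (out : List (List Int)) : Prop := out = pack_chunks_py_alt chunks context_length pad_token_id
instance (chunks : List (List Int)) (context_length : Int) (pad_token_id : Int) (out : List (List Int)) : Decidable (Spec_pack_chunks_py chunks context_length pad_token_id out) := by unfold Spec_pack_chunks_py; infer_instance

-- ===== CLAIM (what is proved, stated in full; the proofs are below) =====
def Claim_equal_pack_chunks_py : Prop := ∀ (chunks : List (List Int)) (context_length : Int) (pad_token_id : Int), Dom_pack_chunks_py chunks context_length pad_token_id → Pre_pack_chunks_py chunks context_length pad_token_id → Spec_pack_chunks_py chunks context_length pad_token_id (pack_chunks_py chunks context_length pad_token_id)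

-- ===== LEMMAS AND PROOFS =====

-- A's flush of `current` equals B's rendering of the index range that flattens to `current`,
-- provided current fits (which the loop invariant guarantees).
lemma flush_eq_render (cur : List Int) (cl pad : Int) (h : cur.length ≤ cl.toNat) :
    pyFlushA cur cl pad = cur ++ List.replicate ((cl - cur.length : Int)).toNat pad := by
  unfold pyFlushA
  rw [List.take_append, List.take_of_length_le h, List.take_replicate]
  congr 2
  omega

-- chunks[start:i+1] flattens to chunks[start:i] flattened ++ chunks[i], when chunks[i:] = chunk :: rs
lemma flat_take_succ (chunks : List (List Int)) (start i : Nat) (chunk : List Int)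
    (rs : List (List Int)) (hle : start ≤ i) (hdrop : chunks.drop i = chunk :: rs) :
    ((chunks.drop start).take (i + 1 - start)).flatMap id
      = ((chunks.drop start).take (i - start)).flatMap id ++ chunk := by
  have h1 : i + 1 - start = (i - start) + 1 := by omega
  rw [h1, List.take_add, List.flatMap_append]
  congr 1
  rw [List.drop_drop]
  have h2 : start + (i - start) = i := by omega
  rw [h2, hdrop]
  simp

-- Main loop correspondence.
lemma loop_eq (chunks : List (List Int)) (cl pad : Int)
    (hpre : ∀ c ∈ chunks, (c.length : Int) ≤ cl) :
    ∀ (rest : List (List Int)) (i : Nat) (groups : List (Nat × Nat)) (start : Nat)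
      (packed : List (List Int)) (current : List Int),
      chunks.drop i = rest → start ≤ i →
      current = ((chunks.drop start).take (i - start)).flatMap id →
      current.length ≤ cl.toNat →
      packed = groups.map (renderGroup chunks cl pad) →
      packALoop rest packed current cl pad
        = (packBLoop rest i groups start (current.length : Int) cl).map (renderGroup chunks cl pad) := by
  intro rest
  induction rest with
  | nil =>
      intro i groups start packed current hdrop hle hcur hfit hpk
      simp only [packALoop, packBLoop]
      by_cases hc : current = []
      · subst hc
        simp [hpk]
      · have : (current.length : Int) ≠ 0 := by
          simpa [Int.natCast_eq_zero, List.length_eq_zero_iff] using hc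
        simp only [if_pos hc, if_pos this, List.map_append, hpk, List.map_cons, List.map_nil]
        congr 1
        rw [flush_eq_render current cl pad hfit]
        simp [renderGroup, ← hcur]
  | cons chunk rs ih =>
      intro i groups start packed current hdrop hle hcur hfit hpk
      have hmem : chunk ∈ chunks := by
        have : chunk ∈ chunks.drop i := by rw [hdrop]; exact List.mem_cons_self
        exact List.mem_of_mem_drop this
      have hchunk : (chunk.length : Int) ≤ cl := hpre chunk hmem
      have hdrop' : chunks.drop (i + 1) = rs := by
        rw [← List.drop_drop, hdrop]; rfl
      simp only [packALoop, packBLoop]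
      by_cases hb : ((current.length : Int) + chunk.length > cl)
      · simp only [if_pos hb]
        have hfit' : chunk.length ≤ cl.toNat := by omega
        have hcur' : chunk = ((chunks.drop i).take (i + 1 - i)).flatMap id := by
          rw [hdrop]; simp
        have := ih (i + 1) (groups ++ [(start, i)]) i
          (packed ++ [pyFlushA current cl pad]) chunk hdrop' (by omega) hcur' hfit'
          (by
            rw [hpk, List.map_append, List.map_cons, List.map_nil]
            congr 1
            rw [flush_eq_render current cl pad hfit]
            simp [renderGroup, ← hcur])
        rw [this]
      · simp only [if_neg hb]
        have hlen : ((current ++ chunk).length : Int) = (current.length : Int) + chunk.length := by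
          simp
        have hfit' : (current ++ chunk).length ≤ cl.toNat := by
          simp only [List.length_append]
          omega
        have hcur' : current ++ chunk = ((chunks.drop start).take (i + 1 - start)).flatMap id := by
          rw [flat_take_succ chunks start i chunk rs hle hdrop, ← hcur]
        have := ih (i + 1) groups start packed (current ++ chunk) hdrop' (by omega) hcur' hfit' hpk
        rw [this, hlen]

-- ===== VERDICT (by name: the statement is the Claim_ definition above) =====
theorem pack_chunks_py_spec : Claim_equal_pack_chunks_py := by
  intro chunks cl pad _ hpre
  unfold Spec_pack_chunks_py pack_chunks_py pack_chunks_py_alt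
  have := loop_eq chunks cl pad hpre chunks 0 [] 0 [] [] (by simp) (by omega)
    (by simp) (by simp) (by simp)
  simpa using this
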